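-- pv_equiv track=rewrite | github.com/DIG-Network/proof_research | sub-problems/verifier-oracle-model/experiments/adaptive-coordinate-or-rsparse-xor-tree-depth-wt-four-five-n8/script.py | build_coord_partition_masks
-- ===== SOURCE A (Python) =====
-- N = 8
--
-- def build_coord_partition_masks(masks: list[int]) -> list[tuple[int, int]]:
--     out: list[tuple[int, int]] = []
--     for i in range(N):
--         b0 = 0
--         b1 = 0
--         for k, m in enumerate(masks):
--             if (m >> i) & 1:
--                 b1 |= 1 << k
--             else:
--                 b0 |= 1 << k
--         out.append((b0, b1))
--     return out
-- ===== SOURCE B (Python) =====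
-- N = 8
--
-- def build_coord_partition_masks(masks: list[int]) -> list[tuple[int, int]]:
--     pairs = [(0, 0)] * N
--     for m in reversed(masks):
--         pairs = [((b0 << 1) | (1 - ((m >> i) & 1)), (b1 << 1) | ((m >> i) & 1))
--                  for i, (b0, b1) in enumerate(pairs)]
--     return pairs
-- ===== Notes on version B (the rewrite author's own statement) =====
-- stated objective: alternative
-- what changed: B builds the eight (b0,b1) pairs back-to-front by a Horner scheme: it folds over reversed(masks), shifting every accumulated pair left by one and OR-ing in the new mask's bit (and its complement), so no enumerate index and no 1<<k power is ever computed; A accumulates column-major with per-index powers 1<<k.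
import Mathlib
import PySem

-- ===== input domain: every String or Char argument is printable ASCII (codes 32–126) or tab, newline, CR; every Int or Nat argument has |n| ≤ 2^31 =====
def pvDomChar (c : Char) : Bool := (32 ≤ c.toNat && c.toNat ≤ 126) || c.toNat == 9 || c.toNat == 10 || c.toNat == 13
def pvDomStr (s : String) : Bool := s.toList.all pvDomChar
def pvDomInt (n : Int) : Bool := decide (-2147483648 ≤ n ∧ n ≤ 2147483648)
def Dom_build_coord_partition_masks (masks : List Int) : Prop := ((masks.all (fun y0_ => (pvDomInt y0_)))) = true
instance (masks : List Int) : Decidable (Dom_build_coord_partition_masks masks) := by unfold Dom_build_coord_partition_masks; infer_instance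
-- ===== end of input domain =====

-- B builds the eight pairs back-to-front by a Horner scheme over reversed(masks) (shift left,
-- OR in the new bit), instead of A's column-major accumulation with 1<<k powers; same cost
-- (objective: alternative).

-- ===== PORT A =====
-- inner loop body of A: k is the enumerate index (always ≥ 0, so .toNat is exact here)
def pvStepA (i : Nat) (bs : Int × Int) (km : Int × Int) : Int × Int :=
  if PySem.Int.band (km.2 >>> i) 1 ≠ 0 then
    (bs.1, PySem.Int.bor bs.2 ((1 : Int) <<< km.1.toNat))
  else
    (PySem.Int.bor bs.1 ((1 : Int) <<< km.1.toNat), bs.2)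

def build_coord_partition_masks (masks : List Int) : List (Int × Int) :=
  (List.range 8).foldl
    (fun out i => out ++ [(PySem.List.enumerate masks 0).foldl (pvStepA i) (0, 0)]) []

-- ===== PORT B =====
-- body of B's loop: rebuild all 8 pairs, shifting each left and OR-ing in bit i of m
def pvStepB (m : Int) (pairs : List (Int × Int)) : List (Int × Int) :=
  (PySem.List.enumerate pairs 0).map (fun x =>
    (PySem.Int.bor ((x.2.1 : Int) <<< (1 : Nat)) (1 - PySem.Int.band (m >>> x.1.toNat) 1),
     PySem.Int.bor ((x.2.2 : Int) <<< (1 : Nat)) (PySem.Int.band (m >>> x.1.toNat) 1)))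

def build_coord_partition_masks_alt (masks : List Int) : List (Int × Int) :=
  masks.reverse.foldl (fun pairs m => pvStepB m pairs) (List.replicate 8 (0, 0))

-- ===== PRECONDITION & SPEC =====
def Spec_build_coord_partition_masks (masks : List Int) (out : List (Int × Int)) : Prop := out = build_coord_partition_masks_alt masks
instance (masks : List Int) (out : List (Int × Int)) : Decidable (Spec_build_coord_partition_masks masks out) := by unfold Spec_build_coord_partition_masks; infer_instance

-- ===== CLAIM (what is proved, stated in full; the proofs are below) =====
def Claim_equal_build_coord_partition_masks : Prop := ∀ (masks : List Int), Dom_build_coord_partition_masks masks → Spec_build_coord_partition_masks masks (build_coord_partition_masks masks)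

-- ===== LEMMAS AND PROOFS =====

-- bit i of m as a Nat (0 or 1)
def pvBit (m : Int) (i : Nat) : Nat := if PySem.Int.band (m >>> i) 1 ≠ 0 then 1 else 0

theorem pvBit_le_one (m : Int) (i : Nat) : pvBit m i ≤ 1 := by
  unfold pvBit; split <;> simp

theorem band_eq_pvBit (m : Int) (i : Nat) : PySem.Int.band (m >>> i) 1 = (pvBit m i : Int) := by
  unfold pvBit
  rw [PySem.Int.band_one]
  have h0 := PySem.Int.mod_nonneg (m >>> i) (b := 2) (by norm_num)
  have h1 := PySem.Int.mod_lt (m >>> i) (b := 2) (by norm_num)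
  split <;> omega

-- the pair of partition masks for bit position i, computed structurally (Horner form)
def pvRec (i : Nat) : List Int → Nat × Nat
  | [] => (0, 0)
  | m :: ms =>
      let p := pvRec i ms
      (2 * p.1 + (1 - pvBit m i), 2 * p.2 + pvBit m i)

theorem foldl_append_singleton {α β : Type} (l : List α) (f : α → β) (acc : List β) :
    l.foldl (fun out i => out ++ [f i]) acc = acc ++ l.map f := by
  induction l generalizing acc with
  | nil => simp
  | cons x xs ih => simp [List.foldl_cons, ih]

-- disjoint-or as addition
theorem nat_or_two_pow (b : Nat) (s : Nat) (hb : b < 2 ^ s) : b ||| 2 ^ s = b + 2 ^ s := by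
  have h := Nat.two_pow_add_eq_or_of_lt hb 1
  simp only [Nat.mul_one] at h
  rw [Nat.or_comm, ← h, Nat.add_comm]

-- A's inner fold, generalized over the start index and accumulators
theorem foldA_eq (i : Nat) (ms : List Int) : ∀ (s b0 b1 : Nat), b0 < 2 ^ s → b1 < 2 ^ s →
    (PySem.List.enumerate ms (s : Int)).foldl (pvStepA i) ((b0 : Int), (b1 : Int))
    = (((b0 + 2 ^ s * (pvRec i ms).1 : Nat) : Int), ((b1 + 2 ^ s * (pvRec i ms).2 : Nat) : Int)) := by
  induction ms with
  | nil => intro s b0 b1 _ _; simp [PySem.List.enumerate_nil, pvRec]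
  | cons m ms ih =>
    intro s b0 b1 hb0 hb1
    rw [PySem.List.enumerate_cons, List.foldl_cons]
    have hcast : ((s : Int) + 1) = (((s + 1 : Nat) : Int)) := by push_cast; ring
    have hone : ((1 : Int) <<< ((s : Int)).toNat) = (((2 ^ s : Nat) : Int)) := by
      rw [Int.toNat_natCast]
      norm_num [Int.shiftLeft_eq]
    rcases Nat.le_one_iff_eq_zero_or_eq_one.mp (pvBit_le_one m i) with hb | hb
    · have hstep : pvStepA i ((b0 : Int), (b1 : Int)) ((s : Int), m)
          = (((b0 + 2 ^ s : Nat) : Int), (b1 : Int)) := by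
        unfold pvStepA
        simp only [band_eq_pvBit, hb, Nat.cast_zero, ne_eq, not_true_eq_false, if_false]
        rw [hone, PySem.Int.bor_natCast, nat_or_two_pow b0 s hb0]
      rw [hstep, hcast, ih (s + 1) (b0 + 2 ^ s) b1 (by simp [pow_succ]; omega) (by simp [pow_succ]; omega)]
      simp only [pvRec, hb, Prod.mk.injEq, Nat.cast_inj]
      constructor <;> (simp only [pow_succ]; ring)
    · have hstep : pvStepA i ((b0 : Int), (b1 : Int)) ((s : Int), m)
          = ((b0 : Int), ((b1 + 2 ^ s : Nat) : Int)) := by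
        unfold pvStepA
        simp only [band_eq_pvBit, hb, Nat.cast_one, ne_eq, one_ne_zero, not_false_eq_true, if_true]
        rw [hone, PySem.Int.bor_natCast, nat_or_two_pow b1 s hb1]
      rw [hstep, hcast, ih (s + 1) b0 (b1 + 2 ^ s) (by simp [pow_succ]; omega) (by simp [pow_succ]; omega)]
      simp only [pvRec, hb, Prod.mk.injEq, Nat.cast_inj]
      constructor <;> (simp only [pow_succ]; ring)

-- disjoint low-bit or as addition
theorem two_mul_or_bit (a b : Nat) (hb : b < 2) : 2 * a ||| b = 2 * a + b := by
  have h := Nat.two_pow_add_eq_or_of_lt (i := 1) hb a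
  simpa [pow_one, mul_comm] using h.symm

theorem enumerate_map_range {α : Type} (n : Nat) (g : Nat → α) :
    PySem.List.enumerate ((List.range n).map g) 0 = (List.range n).map (fun (k : Nat) => ((k : Int), g k)) := by
  apply List.ext_getElem?
  intro k
  rw [PySem.List.getElem?_enumerate]
  by_cases hk : k < n <;> simp [hk]

theorem bor_two_mul_one (a : Nat) : PySem.Int.bor (2 * (a : Int)) 1 = 2 * (a : Int) + 1 := by
  have h2 : (2 * (a : Int)) = ((2 * a : Nat) : Int) := by push_cast; ring
  have h1 : (1 : Int) = ((1 : Nat) : Int) := by norm_num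
  rw [h2, h1, PySem.Int.bor_natCast, two_mul_or_bit a 1 (by norm_num)]
  push_cast; ring

theorem int_shl_one (a : Nat) : ((a : Int) <<< (1 : Nat)) = ((2 * a : Nat) : Int) := by
  norm_num [Int.shiftLeft_eq]
  ring

-- B's fold produces exactly the Horner pairs
theorem foldB_eq (ms : List Int) :
    build_coord_partition_masks_alt ms
    = (List.range 8).map (fun i => (((pvRec i ms).1 : Int), ((pvRec i ms).2 : Int))) := by
  unfold build_coord_partition_masks_alt
  rw [List.foldl_reverse]
  induction ms with
  | nil => decide
  | cons m ms ih =>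
    rw [List.foldr_cons, ih]
    unfold pvStepB
    rw [enumerate_map_range, List.map_map]
    apply List.map_congr_left
    intro k _
    simp only [Function.comp_apply, Int.toNat_natCast, int_shl_one,
      Int.shiftRight_natCast_right]
    have hband := band_eq_pvBit m k
    rcases Nat.le_one_iff_eq_zero_or_eq_one.mp (pvBit_le_one m k) with hb | hb <;>
      rw [hb] at hband <;>
      simp only [pvRec, hb, hband] <;>
      norm_num [bor_two_mul_one]

-- ===== VERDICT (by name: the statement is the Claim_ definition above) =====
theorem build_coord_partition_masks_spec : Claim_equal_build_coord_partition_masks := by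
  intro masks _
  unfold Spec_build_coord_partition_masks
  rw [foldB_eq]
  unfold build_coord_partition_masks
  rw [foldl_append_singleton]
  simp only [List.nil_append]
  apply List.map_congr_left
  intro i _
  have h := foldA_eq i masks 0 0 0 (by norm_num) (by norm_num)
  simpa using h
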